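-- pv_equiv track=rewrite | github.com/genius-yl/Programmers-practice | Lv3_best_set.py | solution
-- ===== SOURCE A (Python) =====
-- def solution(n, s):
--     if s < n:
--         return [-1]
-- #곱을 최대화하려면 숫자를 최대한 고르게 나눠야 함
--     base = s // n
--     rest = s % n
--
--     answer = [base] * n
--
--     # 앞에서부터 1씩 더해서 나머지 분배
--     for i in range(rest):
--         answer[-1 - i] += 1  # 끝에서부터 채워야 오름차순 유지
--
--     return sorted(answer)
-- ===== SOURCE B (Python) =====
-- def solution(n, s):
--     if s < n:
--         return [-1]
--     # i-th factor of the evenest split of s into n parts, directly: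
--     # floor((s+i)/n) for i in 0..n-1; these sum to s and are ascending.
--     return [(s + i) // n for i in range(n)]
-- ===== Notes on version B (the rewrite author's own statement) =====
-- stated objective: alternative
-- what changed: B computes each element directly as the closed form (s+i)//n over i in range(n) (one comprehension, no remainder computation, no mutation, no sort), replacing A's base/rest block construction with an in-place distribution loop followed by sorted().
-- crash fix: For n = 0 with s >= 0 A raises ZeroDivisionError at s // n while B's empty range yields []. — e.g. on solution(0, 5): A raises ZeroDivisionError, B returns []
import Mathlib
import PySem

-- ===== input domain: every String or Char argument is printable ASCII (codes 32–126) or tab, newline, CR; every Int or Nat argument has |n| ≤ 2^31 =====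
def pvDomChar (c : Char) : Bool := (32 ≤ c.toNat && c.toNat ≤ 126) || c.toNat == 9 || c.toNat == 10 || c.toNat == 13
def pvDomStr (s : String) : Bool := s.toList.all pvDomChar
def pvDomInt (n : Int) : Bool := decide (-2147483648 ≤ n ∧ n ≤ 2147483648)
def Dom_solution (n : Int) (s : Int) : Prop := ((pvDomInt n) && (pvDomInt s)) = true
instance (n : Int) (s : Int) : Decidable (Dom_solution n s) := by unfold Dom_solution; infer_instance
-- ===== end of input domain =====

-- B replaces A's distribute-and-sort with a per-index closed form (s+i)//n, no remainder, no mutation, no sort.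

-- ===== PORT A =====
def solution (n : Int) (s : Int) : List Int :=
  if s < n then [-1]
  else
    let base := PySem.Int.floordiv s n
    let rest := PySem.Int.mod s n
    let answer := PySem.List.pyRepeat [base] n
    let answer := (PySem.List.pyRange 0 rest 1).foldl
      (fun acc i => PySem.List.pySetD acc (-1 - i) (PySem.List.pyGetD acc (-1 - i) 0 + 1)) answer
    PySem.List.sorted answer (fun x => x) false

-- ===== PORT B =====
def solution_alt (n : Int) (s : Int) : List Int :=
  if s < n then [-1]
  else (PySem.List.pyRange 0 n 1).map (fun i => PySem.Int.floordiv (s + i) n)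

-- ===== PRECONDITION & SPEC =====
-- Pre_ excludes only n = 0 with n ≤ s, where A raises ZeroDivisionError on s // n.
def Pre_solution (n : Int) (s : Int) : Prop := n ≠ 0 ∨ s < n
instance (n : Int) (s : Int) : Decidable (Pre_solution n s) := by unfold Pre_solution; infer_instance
def pvWitness_solution : Int × Int := (3, 14)

-- For n = 0 and s ≥ 0 A raises ZeroDivisionError at s // n; B's empty range yields [].
def Raises_solution (n : Int) (s : Int) : Prop := n = 0 ∧ 0 ≤ s
instance (n : Int) (s : Int) : Decidable (Raises_solution n s) := by unfold Raises_solution; infer_instance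
def pvRaiseWitness_solution : Int × Int := (0, 5)
def pvRaiseWitnessOut_solution : List Int := []

def Spec_solution (n : Int) (s : Int) (out : List Int) : Prop := out = solution_alt n s
instance (n : Int) (s : Int) (out : List Int) : Decidable (Spec_solution n s out) := by unfold Spec_solution; infer_instance

-- ===== CLAIM (what is proved, stated in full; the proofs are below) =====
def Claim_equal_solution : Prop := ∀ (n : Int) (s : Int), Dom_solution n s → Pre_solution n s → Spec_solution n s (solution n s)
def Claim_raises_solution : Prop := (∀ (n : Int) (s : Int), Dom_solution n s → Raises_solution n s → ¬ Pre_solution n s) ∧ (Dom_solution (pvRaiseWitness_solution.1) (pvRaiseWitness_solution.2) ∧ Raises_solution (pvRaiseWitness_solution.1) (pvRaiseWitness_solution.2) ∧ solution_alt (pvRaiseWitness_solution.1) (pvRaiseWitness_solution.2) = pvRaiseWitnessOut_solution)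

-- ===== LEMMAS AND PROOFS =====

-- Python's xs[-k] = v for a negative in-range index
theorem pySetD_neg {α : Type} (xs : List α) (k : Nat) (v : α)
    (h1 : 0 < k) (h2 : k ≤ xs.length) :
    PySem.List.pySetD xs (-(k : Int)) v = xs.set (xs.length - k) v := by
  simp [PySem.List.pySetD, PySem.List.pySet?, PySem.List.pyIdx?, Nat.pos_iff_ne_zero.mp h1, h2]

-- setting the last cell of the base block moves it into the base+1 block
theorem set_blocks (base : Int) (p r : Nat) :
    (List.replicate (p+1) base ++ List.replicate r (base+1)).set p (base+1)
    = List.replicate p base ++ List.replicate (r+1) (base+1) := by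
  rw [List.replicate_succ' (n := p), List.set_append, if_pos (by simp), List.set_append,
      if_neg (by simp)]
  simp [List.replicate_succ]

-- A's loop over range(r) adds 1 at positions m-1, …, m-r of [base]*m
theorem loop_eval (base : Int) (r m : Nat) (h : r ≤ m) :
    (PySem.List.pyRange 0 (r : Int) 1).foldl
      (fun acc i => PySem.List.pySetD acc (-1 - i) (PySem.List.pyGetD acc (-1 - i) 0 + 1))
      (List.replicate m base)
    = List.replicate (m - r) base ++ List.replicate r (base + 1) := by
  induction r with
  | zero => simp [PySem.List.pyRange_one_eq_nil]
  | succ r ih =>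
    have hcast : ((r + 1 : Nat) : Int) = (r : Int) + 1 := by push_cast; ring
    rw [hcast, PySem.List.pyRange_one_succ_right (by omega), List.foldl_append,
        ih (by omega)]
    simp only [List.foldl_cons, List.foldl_nil]
    set L := List.replicate (m - r) base ++ List.replicate r (base + 1) with hL
    have hlen : L.length = m := by simp [hL]; omega
    have hidx : (-1 - (r : Int)) = -((r + 1 : Nat) : Int) := by push_cast; ring
    have hget : PySem.List.pyGetD L (-1 - (r : Int)) 0 = base := by
      rw [hidx, PySem.List.pyGetD_neg_natCast L (r+1) 0 (by omega) (by omega)]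
      rw [List.getElem_append_left (by simp; omega)]
      simp
    rw [hget, hidx, pySetD_neg L (r+1) (base+1) (by omega) (by omega), hlen, hL]
    have hm : m - r = (m - (r+1)) + 1 := by omega
    rw [hm, set_blocks]

-- the two-block list is already sorted, so sorted() is the identity on it
theorem sorted_two_blocks (base : Int) (p r : Nat) :
    PySem.List.sorted (List.replicate p base ++ List.replicate r (base + 1)) (fun x => x) false
    = List.replicate p base ++ List.replicate r (base + 1) := by
  apply PySem.List.sorted_eq_self_of_pairwise
  rw [List.pairwise_append]
  refine ⟨List.pairwise_replicate.2 (Or.inr le_rfl),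
          List.pairwise_replicate.2 (Or.inr le_rfl), ?_⟩
  intro a ha b hb
  rw [List.eq_of_mem_replicate ha, List.eq_of_mem_replicate hb]; omega

-- B's per-index closed form produces exactly the two-block list
theorem map_eval (s : Int) (m r : Nat) (base : Int) (hm : 0 < (m : Int))
    (hs : s = base * m + r) (hr : r < m) :
    (PySem.List.pyRange 0 (m : Int) 1).map (fun i => PySem.Int.floordiv (s + i) (m : Int))
    = List.replicate (m - r) base ++ List.replicate r (base + 1) := by
  apply List.ext_getElem
  · simp [PySem.List.length_pyRange_one]; omega
  · intro k hk1 hk2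
    have hk : k < m := by
      have := hk1; simpa [PySem.List.length_pyRange_one] using this
    have h1 : ((PySem.List.pyRange 0 (m : Int) 1).map
        (fun i => PySem.Int.floordiv (s + i) (m : Int)))[k]? =
        some (PySem.Int.floordiv (s + k) (m : Int)) :=
      PySem.List.getElem?_map_pyRange_zero _ _ _ hk
    have h1' : ((PySem.List.pyRange 0 (m : Int) 1).map
        (fun i => PySem.Int.floordiv (s + i) (m : Int)))[k] =
        PySem.Int.floordiv (s + k) (m : Int) := by
      have := List.getElem?_eq_getElem hk1
      rw [this] at h1; exact Option.some.inj h1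
    rw [h1']
    have hkI : (k : Int) < (m : Int) := by exact_mod_cast hk
    have hrI : (r : Int) < (m : Int) := by exact_mod_cast hr
    have h0k : (0 : Int) ≤ (k : Int) := Int.natCast_nonneg k
    have h0r : (0 : Int) ≤ (r : Int) := Int.natCast_nonneg r
    by_cases hcase : k < m - r
    · have hkr : (k : Int) + (r : Int) < (m : Int) := by exact_mod_cast (by omega : k + r < m)
      rw [List.getElem_append_left (by simpa using hcase), List.getElem_replicate]
      rw [PySem.Int.floordiv_eq_iff_of_pos (hb := hm)]
      constructor
      · rw [hs]; linarith
      · rw [hs]; linarith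
    · have hkr : (m : Int) ≤ (k : Int) + (r : Int) := by exact_mod_cast (by omega : m ≤ k + r)
      rw [List.getElem_append_right (by simpa using hcase), List.getElem_replicate]
      rw [PySem.Int.floordiv_eq_iff_of_pos (hb := hm)]
      constructor
      · rw [hs]; linarith
      · rw [hs]; linarith

-- ===== VERDICT (by name: the statement is the Claim_ definition above) =====
theorem solution_spec : Claim_equal_solution := by
  intro n s _ hpre
  unfold Spec_solution solution solution_alt
  by_cases hs : s < n
  · simp [hs]
  · simp only [hs, if_false]
    rcases lt_trichotomy n 0 with hn | hn | hn
    · -- n < 0 : both sides are []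
      have hb := PySem.Int.mod_neg_bounds (a := s) (b := n) hn
      rw [PySem.List.pyRange_one_eq_nil (by omega), PySem.List.pyRange_one_eq_nil (by omega)]
      simp only [List.foldl_nil, PySem.List.pyRepeat_singleton, List.map_nil]
      have h1 : n.toNat = 0 := by omega
      rw [h1]
      simp [PySem.List.sorted_eq_nil_iff]
    · exact absurd hn (hpre.resolve_right hs)
    · -- n > 0
      have h0 : 0 ≤ PySem.Int.mod s n := PySem.Int.mod_nonneg (a := s) hn
      have hlt : PySem.Int.mod s n < n := PySem.Int.mod_lt (a := s) hn
      obtain ⟨r, hr⟩ : ∃ r : Nat, PySem.Int.mod s n = (r : Int) := ⟨_, (Int.toNat_of_nonneg h0).symm⟩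
      obtain ⟨m, hm⟩ : ∃ m : Nat, n = (m : Int) := ⟨_, (Int.toNat_of_nonneg (le_of_lt hn)).symm⟩
      have hrm : r < m := by omega
      have hr' : PySem.Int.mod s (m : Int) = (r : Int) := hm ▸ hr
      have hdecomp : s = PySem.Int.floordiv s (m : Int) * m + r := by
        have := PySem.Int.floordiv_mul_add_mod s (m : Int)
        omega
      simp only [hm, hr', PySem.List.pyRepeat_singleton, Int.toNat_natCast]
      rw [loop_eval _ r m (le_of_lt hrm), sorted_two_blocks,
          map_eval s m r _ (hm ▸ hn) hdecomp hrm]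

theorem solution_raises : Claim_raises_solution := by
  unfold Claim_raises_solution
  exact ⟨fun n s _ hr => by unfold Raises_solution at hr; unfold Pre_solution; omega, by decide⟩

-- self-check: the raise witness really lies inside Raises_solution (via solution_raises)
theorem solution_raises_witness :
    Raises_solution pvRaiseWitness_solution.1 pvRaiseWitness_solution.2 := by
  have h := solution_raises
  unfold Claim_raises_solution at h
  exact h.2.2.1
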